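-- pv_equiv track=rewrite | github.com/abdelhalim-yasser/Top-Interview-150 | Shortest un-ordered subarray/Shortest_un-ordered_subarray.py | shortestUnorderedSubarray
-- ===== SOURCE A (Python) =====
-- def shortestUnorderedSubarray(arr):
--     increase = False
--     decrease = False
--
--     for i in range(1, len(arr)):
--         if(arr[i-1] < arr[i]):
--             increase = True
--         if(arr[i-1] > arr[i]):
--             decrease = True
--
--     if increase and decrease:
--         return 3
--
--     return 0
-- ===== SOURCE B (Python) =====
-- def shortestUnorderedSubarray(arr):
--     return 3 if arr != sorted(arr) and arr != sorted(arr, reverse=True) else 0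
-- ===== Notes on version B (the rewrite author's own statement) =====
-- stated objective: idiomatic
-- what changed: Replaces the adjacency scan with two rise/fall flags by a sort-then-compare one-liner: the array has both a rise and a fall exactly when it equals neither its ascending nor its descending sort.
import Mathlib
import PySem

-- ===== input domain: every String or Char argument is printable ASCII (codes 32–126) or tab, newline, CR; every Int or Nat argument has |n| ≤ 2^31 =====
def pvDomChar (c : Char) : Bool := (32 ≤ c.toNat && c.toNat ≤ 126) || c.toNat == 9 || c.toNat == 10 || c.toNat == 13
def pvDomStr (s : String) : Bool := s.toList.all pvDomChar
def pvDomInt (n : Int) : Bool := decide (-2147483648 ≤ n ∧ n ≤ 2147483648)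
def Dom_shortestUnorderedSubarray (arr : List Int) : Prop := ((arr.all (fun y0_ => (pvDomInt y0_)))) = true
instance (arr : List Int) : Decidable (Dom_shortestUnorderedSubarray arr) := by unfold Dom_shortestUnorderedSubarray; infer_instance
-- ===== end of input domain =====

-- B replaces A's adjacency scan with two flags by a sort-then-compare one-liner (idiomatic, not faster).

-- ===== PORT A =====
-- flag loop: for i in range(1, len(arr)): set increase/decrease from arr[i-1], arr[i]
def shortestUnorderedSubarray (arr : List Int) : Int :=
  let st := (PySem.List.pyRange 1 arr.length 1).foldl
    (fun (s : Bool × Bool) i =>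
      let inc := if PySem.List.pyGetD arr (i - 1) 0 < PySem.List.pyGetD arr i 0 then true else s.1
      let dec := if PySem.List.pyGetD arr (i - 1) 0 > PySem.List.pyGetD arr i 0 then true else s.2
      (inc, dec)) (false, false)
  if st.1 && st.2 then 3 else 0

-- ===== PORT B =====
def shortestUnorderedSubarray_alt (arr : List Int) : Int :=
  if arr ≠ PySem.List.sorted arr (fun x => x) false ∧ arr ≠ PySem.List.sorted arr (fun x => x) true
  then 3 else 0

-- ===== PRECONDITION & SPEC =====
def Spec_shortestUnorderedSubarray (arr : List Int) (out : Int) : Prop := out = shortestUnorderedSubarray_alt arr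
instance (arr : List Int) (out : Int) : Decidable (Spec_shortestUnorderedSubarray arr out) := by unfold Spec_shortestUnorderedSubarray; infer_instance

-- ===== CLAIM (what is proved, stated in full; the proofs are below) =====
def Claim_equal_shortestUnorderedSubarray : Prop := ∀ (arr : List Int), Dom_shortestUnorderedSubarray arr → Spec_shortestUnorderedSubarray arr (shortestUnorderedSubarray arr)

-- ===== LEMMAS AND PROOFS =====

-- A's index loop over range(1, len) visits exactly the adjacent pairs zip arr arr.tail
theorem adj_fold {σ : Type} (f : σ → Int → Int → σ) :
    ∀ (arr : List Int) (init : σ),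
      (List.range (arr.length - 1)).foldl
          (fun s k => f s (arr.getD k 0) (arr.getD (k + 1) 0)) init
        = (arr.zip arr.tail).foldl (fun s p => f s p.1 p.2) init := by
  intro arr
  induction arr with
  | nil => intro init; simp
  | cons x t ih =>
    intro init
    cases t with
    | nil => simp
    | cons y t' =>
      simp only [List.length_cons, Nat.add_sub_cancel, List.range_succ_eq_map,
        List.foldl_cons, List.foldl_map, List.zip_cons_cons, List.tail_cons]
      simpa using ih (f init x y)

-- the flag-pair fold is the pair of existential checks over the pairs
theorem flags_fold (ps : List (Int × Int)) :
    ∀ (s : Bool × Bool),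
      ps.foldl (fun (s : Bool × Bool) p =>
          (if p.1 < p.2 then true else s.1, if p.1 > p.2 then true else s.2)) s
        = (s.1 || ps.any (fun p => decide (p.1 < p.2)),
           s.2 || ps.any (fun p => decide (p.1 > p.2))) := by
  induction ps with
  | nil => intro s; simp
  | cons p t ih =>
    intro s
    simp only [List.foldl_cons, List.any_cons, ih]
    by_cases h1 : p.1 < p.2 <;> by_cases h2 : p.1 > p.2 <;>
      simp [h1, h2]

-- no adjacent strict fall ↔ the list is pairwise nondecreasing
theorem no_fall_iff (arr : List Int) :
    ((arr.zip arr.tail).any (fun p => decide (p.1 > p.2)) = false)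
      ↔ arr.Pairwise (· ≤ ·) := by
  induction arr with
  | nil => simp
  | cons x t ih =>
    cases t with
    | nil => simp
    | cons y t' =>
      rw [← List.isChain_iff_pairwise, List.isChain_cons_cons, List.isChain_iff_pairwise]
      simp only [List.zip_cons_cons, List.tail_cons, List.any_cons, Bool.or_eq_false_iff,
        decide_eq_false_iff_not, not_lt] at *
      constructor
      · rintro ⟨h1, h2⟩; exact ⟨h1, ih.mp h2⟩
      · rintro ⟨h1, h2⟩; exact ⟨h1, ih.mpr h2⟩

-- no adjacent strict rise ↔ the list is pairwise nonincreasing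
theorem no_rise_iff (arr : List Int) :
    ((arr.zip arr.tail).any (fun p => decide (p.1 < p.2)) = false)
      ↔ arr.Pairwise (fun a b => b ≤ a) := by
  induction arr with
  | nil => simp
  | cons x t ih =>
    cases t with
    | nil => simp
    | cons y t' =>
      rw [← List.isChain_iff_pairwise, List.isChain_cons_cons, List.isChain_iff_pairwise]
      simp only [List.zip_cons_cons, List.tail_cons, List.any_cons, Bool.or_eq_false_iff,
        decide_eq_false_iff_not, not_lt] at *
      constructor
      · rintro ⟨h1, h2⟩; exact ⟨h1, ih.mp h2⟩
      · rintro ⟨h1, h2⟩; exact ⟨h1, ih.mpr h2⟩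

-- arr equals its ascending sort ↔ pairwise nondecreasing
theorem eq_sorted_asc_iff (arr : List Int) :
    arr = PySem.List.sorted arr (fun x => x) false ↔ arr.Pairwise (· ≤ ·) := by
  constructor
  · intro h; rw [h]; simpa using PySem.List.sorted_pairwise arr (fun x => x)
  · intro h; exact (PySem.List.sorted_eq_self_of_pairwise arr (fun x => x) (by simpa using h)).symm
-- arr equals its descending sort ↔ pairwise nonincreasing
theorem eq_sorted_desc_iff (arr : List Int) :
    arr = PySem.List.sorted arr (fun x => x) true ↔ arr.Pairwise (fun a b => b ≤ a) := by
  constructor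
  · intro h; rw [h]; simpa using PySem.List.sorted_pairwise_rev arr (fun x => x)
  · intro h; exact (PySem.List.sorted_rev_eq_self_of_pairwise arr (fun x => x) (by simpa using h)).symm

-- ===== VERDICT (by name: the statement is the Claim_ definition above) =====
theorem shortestUnorderedSubarray_spec : Claim_equal_shortestUnorderedSubarray := by
  intro arr _
  show shortestUnorderedSubarray arr = shortestUnorderedSubarray_alt arr
  unfold shortestUnorderedSubarray shortestUnorderedSubarray_alt
  have hrange := PySem.List.pyRange_one 1 (arr.length : Int)
  have hlen : ((arr.length : Int) - 1).toNat = arr.length - 1 := by omega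
  rw [hrange, hlen, List.foldl_map]
  rw [List.foldl_ext _
      (fun (s : Bool × Bool) (k : Nat) =>
        (if arr.getD k 0 < arr.getD (k + 1) 0 then true else s.1,
         if arr.getD k 0 > arr.getD (k + 1) 0 then true else s.2))
      (false, false)
      (by
        intro s k _
        have e1 : (1 : Int) + (k : Int) - 1 = ((k : Nat) : Int) := by ring
        have e2 : (1 : Int) + (k : Int) = (((k + 1 : Nat)) : Int) := by push_cast; ring
        rw [e1]
        simp only [e2, PySem.List.pyGetD_natCast])]
  rw [adj_fold (fun s a b =>
        (if a < b then true else s.1, if a > b then true else s.2)) arr (false, false)]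
  rw [flags_fold]
  simp only [Bool.false_or]
  by_cases hr : (arr.zip arr.tail).any (fun p => decide (p.1 < p.2)) = true
  · by_cases hf : (arr.zip arr.tail).any (fun p => decide (p.1 > p.2)) = true
    · have hna : ¬ arr = PySem.List.sorted arr (fun x => x) false := by
        rw [eq_sorted_asc_iff, ← no_fall_iff]; simp [hf]
      have hnd : ¬ arr = PySem.List.sorted arr (fun x => x) true := by
        rw [eq_sorted_desc_iff, ← no_rise_iff]; simp [hr]
      rw [if_pos (show arr ≠ PySem.List.sorted arr (fun x => x) false ∧
            arr ≠ PySem.List.sorted arr (fun x => x) true from ⟨hna, hnd⟩)]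
      simp [hr, hf]
    · have hf' : (arr.zip arr.tail).any (fun p => decide (p.1 > p.2)) = false :=
        Bool.eq_false_iff.mpr hf
      have ha : arr = PySem.List.sorted arr (fun x => x) false := by
        rw [eq_sorted_asc_iff, ← no_fall_iff]; exact hf'
      rw [if_neg (show ¬ (arr ≠ PySem.List.sorted arr (fun x => x) false ∧
            arr ≠ PySem.List.sorted arr (fun x => x) true) from fun hc => hc.1 ha)]
      simp [hf']
  · have hr' : (arr.zip arr.tail).any (fun p => decide (p.1 < p.2)) = false :=
      Bool.eq_false_iff.mpr hr
    have hd : arr = PySem.List.sorted arr (fun x => x) true := by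
      rw [eq_sorted_desc_iff, ← no_rise_iff]; exact hr'
    rw [if_neg (show ¬ (arr ≠ PySem.List.sorted arr (fun x => x) false ∧
          arr ≠ PySem.List.sorted arr (fun x => x) true) from fun hc => hc.2 hd)]
    simp [hr']
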